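-- pv_equiv track=rewrite | github.com/Sherlockk-23/midiDraw | GiantMusicTransformer/my_utils.py | trim_to_chord
-- ===== SOURCE A (Python) =====
-- def trim_to_chord(lst, max_trim_len=30, enabled=False):
--
--   if enabled:
--
--     # Reverse the list
--     reversed_lst = lst[::-1]
--     idx = 0
--     for i, value in enumerate(reversed_lst):
--         # Check if the value is non-zero
--         if 0 < value < 256:
--             # Convert the index to be from the end of the list
--             idx = len(lst) - i - 1
--             break
--
--     trimmed_list = lst[:idx]
--
--     if (len(lst) - len(trimmed_list)) <= max_trim_len:
--
--       return trimmed_list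
--
--     else:
--       return lst
--
--   else:
--     return lst
-- ===== SOURCE B (Python) =====
-- def trim_to_chord(lst, max_trim_len=30, enabled=False):
--     if not enabled:
--         return lst
--     matches = [i for i, v in enumerate(lst) if 0 < v < 256]
--     idx = matches[-1] if matches else 0
--     trimmed = lst[:idx]
--     return trimmed if len(lst) - len(trimmed) <= max_trim_len else lst
-- ===== Notes on version B (the rewrite author's own statement) =====
-- stated objective: idiomatic
-- what changed: Replaced the reversed-copy scan with an early break by a single forward pass that collects all in-range indices and takes the last one (default 0).
import Mathlib
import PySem

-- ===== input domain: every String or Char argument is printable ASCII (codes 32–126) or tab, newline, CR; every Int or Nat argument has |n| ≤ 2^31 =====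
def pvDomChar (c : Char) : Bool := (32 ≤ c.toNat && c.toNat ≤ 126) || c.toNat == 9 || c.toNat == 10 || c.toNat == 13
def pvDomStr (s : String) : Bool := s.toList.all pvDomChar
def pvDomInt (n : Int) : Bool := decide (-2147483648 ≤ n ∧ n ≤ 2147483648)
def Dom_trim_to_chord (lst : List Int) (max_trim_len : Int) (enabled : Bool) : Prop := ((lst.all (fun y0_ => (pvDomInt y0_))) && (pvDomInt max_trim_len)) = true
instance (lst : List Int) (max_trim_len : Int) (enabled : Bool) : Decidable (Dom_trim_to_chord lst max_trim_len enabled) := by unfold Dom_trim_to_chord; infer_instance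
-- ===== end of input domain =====

-- B replaces A's reverse-copy-and-break scan by a forward pass collecting all in-range indices and taking the last (idiomatic decomposition; same cost).

-- ===== PORT A =====
-- the for-loop over enumerate(reversed_lst) with its break, keeping idx = 0 when no element matches
def trimLoopA : List Int → Int → Int → Int
  | [], _, _ => 0
  | v :: rest, n, i => if 0 < v ∧ v < 256 then n - i - 1 else trimLoopA rest n (i + 1)

def trim_to_chord (lst : List Int) (max_trim_len : Int) (enabled : Bool) : List Int :=
  if enabled then
    -- lst[::-1] ported via List.reverse (exact: PySem.List.slice?_none_none_neg_one)
    let reversed_lst := lst.reverse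
    let idx := trimLoopA reversed_lst (lst.length : Int) 0
    let trimmed_list := PySem.List.slice lst none (some idx)
    if (lst.length : Int) - (trimmed_list.length : Int) ≤ max_trim_len then trimmed_list
    else lst
  else lst

-- ===== PORT B =====
def trim_to_chord_alt (lst : List Int) (max_trim_len : Int) (enabled : Bool) : List Int :=
  if !enabled then lst
  else
    let hits := ((PySem.List.enumerate lst 0).filter (fun p => decide (0 < p.2 ∧ p.2 < 256))).map (·.1)
    let idx := hits.getLast?.getD 0
    let trimmed := PySem.List.slice lst none (some idx)
    if (lst.length : Int) - (trimmed.length : Int) ≤ max_trim_len then trimmed else lst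

-- ===== PRECONDITION & SPEC =====
def Spec_trim_to_chord (lst : List Int) (max_trim_len : Int) (enabled : Bool) (out : List Int) : Prop := out = trim_to_chord_alt lst max_trim_len enabled
instance (lst : List Int) (max_trim_len : Int) (enabled : Bool) (out : List Int) : Decidable (Spec_trim_to_chord lst max_trim_len enabled out) := by unfold Spec_trim_to_chord; infer_instance

-- ===== CLAIM (what is proved, stated in full; the proofs are below) =====
def Claim_equal_trim_to_chord : Prop := ∀ (lst : List Int) (max_trim_len : Int) (enabled : Bool), Dom_trim_to_chord lst max_trim_len enabled → Spec_trim_to_chord lst max_trim_len enabled (trim_to_chord lst max_trim_len enabled)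

-- ===== LEMMAS AND PROOFS =====

lemma trimLoopA_shift (r : List Int) (n i : Int) :
    trimLoopA r (n + 1) (i + 1) = trimLoopA r n i := by
  induction r generalizing i with
  | nil => rfl
  | cons v rest ih =>
    simp only [trimLoopA]
    split_ifs with h
    · ring
    · exact ih (i + 1)

lemma trimLoopA_shift0 (r : List Int) (n : Int) :
    trimLoopA r (n + 1) 1 = trimLoopA r n 0 := by
  simpa using trimLoopA_shift r n 0

lemma idx_eq (lst : List Int) :
    trimLoopA lst.reverse (lst.length : Int) 0 =
      ((((PySem.List.enumerate lst 0).filter (fun p => decide (0 < p.2 ∧ p.2 < 256))).map (·.1)).getLast?.getD 0) := by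
  induction lst using List.reverseRecOn with
  | nil => rfl
  | append_singleton ys x ih =>
    rw [List.reverse_append, List.reverse_singleton, List.singleton_append,
        PySem.List.enumerate_append, List.filter_append]
    by_cases h : 0 < x ∧ x < 256
    · have hd : (decide (0 < x ∧ x < 256)) = true := by simp [h]
      simp only [trimLoopA, if_pos h, PySem.List.enumerate_cons, PySem.List.enumerate_nil,
        List.filter_cons, List.filter_nil, hd, if_true, List.map_append, List.map_cons,
        List.map_nil, List.getLast?_concat, Option.getD_some, List.length_append,
        List.length_cons, List.length_nil]
      push_cast; ring
    · have hd : (decide (0 < x ∧ x < 256)) = false := by simp [h]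
      simp only [trimLoopA, if_neg h, PySem.List.enumerate_cons, PySem.List.enumerate_nil,
        List.filter_cons, List.filter_nil, hd, Bool.false_eq_true, if_false, List.append_nil,
        List.length_append, List.length_cons, List.length_nil, zero_add]
      push_cast
      rw [trimLoopA_shift0, ih]

-- ===== VERDICT (by name: the statement is the Claim_ definition above) =====
theorem trim_to_chord_spec : Claim_equal_trim_to_chord := by
  intro lst max_trim_len enabled _
  unfold Spec_trim_to_chord trim_to_chord trim_to_chord_alt
  cases enabled <;> simp [idx_eq lst]
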